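-- pv_equiv track=rewrite | github.com/tina-wen/xtuner | cpu_binder.py | cpu_to_mask
-- ===== SOURCE A (Python) =====
-- from collections import defaultdict
-- from typing import List, Dict, Tuple, Optional
--
-- CPU_MASK_BIT = 32
--
-- def cpu_to_mask(cpus: List[int]) -> str:
--     groups = defaultdict(int)
--     for cpu in cpus:
--         group = cpu // CPU_MASK_BIT
--         bit = cpu % CPU_MASK_BIT
--         groups[group] |= (1 << bit)
--
--     max_group = max(groups.keys())
--     mask_parts = []
--     for group in reversed(range(max_group + 1)):
--         mask_parts.append(f"{groups.get(group, 0):08x}")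
--     return ",".join(mask_parts)
-- ===== SOURCE B (Python) =====
-- CPU_MASK_BIT = 32
--
-- def cpu_to_mask(cpus):
--     max_group = max(cpus) // CPU_MASK_BIT
--     words = []
--     for group in range(max_group, -1, -1):
--         word = 0
--         for cpu in cpus:
--             if cpu // CPU_MASK_BIT == group:
--                 word |= 1 << (cpu % CPU_MASK_BIT)
--         words.append(f"{word:08x}")
--     return ",".join(words)
-- ===== Notes on version B (the rewrite author's own statement) =====
-- stated objective: simpler
-- what changed: Eliminates the defaultdict of per-group masks entirely: each 32-bit output word is computed directly by a scan that ORs the bits of the cpus falling in that group, so there is no mask container and no key maximum; Pre_ excludes only the empty list, on which both implementations raise ValueError (max of empty sequence).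
import Mathlib
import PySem

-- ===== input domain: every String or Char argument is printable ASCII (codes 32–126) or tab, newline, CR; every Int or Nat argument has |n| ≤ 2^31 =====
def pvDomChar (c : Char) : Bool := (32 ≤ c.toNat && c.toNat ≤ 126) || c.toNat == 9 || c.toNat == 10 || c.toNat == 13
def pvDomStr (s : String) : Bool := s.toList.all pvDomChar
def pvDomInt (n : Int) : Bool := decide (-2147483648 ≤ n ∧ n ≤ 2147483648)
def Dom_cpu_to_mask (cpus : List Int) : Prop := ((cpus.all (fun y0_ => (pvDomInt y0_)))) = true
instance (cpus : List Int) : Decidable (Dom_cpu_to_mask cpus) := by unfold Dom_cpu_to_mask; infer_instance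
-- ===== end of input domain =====

-- B drops the defaultdict of per-group masks: each 32-bit output word is computed directly by a
-- scan over the cpus of that group, so no mask container is built (simpler, no asymptotic claim).

-- ===== PORT A =====
-- shared formatting helper: f"{v:08x}", exact for 0 ≤ v (both programs format only such values)

def hexDigit (n : Nat) : Char := if n < 10 then Char.ofNat (48 + n) else Char.ofNat (87 + n)

def hexChars (n : Nat) : List Char :=
  if h : n = 0 then [] else hexChars (n / 16) ++ [hexDigit (n % 16)]
decreasing_by exact Nat.div_lt_self (Nat.pos_of_ne_zero h) (by norm_num)

def hex8 (v : Int) : String :=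
  let ds := if v = 0 then ['0'] else hexChars v.toNat
  String.ofList (List.replicate (8 - ds.length) '0' ++ ds)

def cpu_to_mask (cpus : List Int) : String :=
  let groups : PySem.Dict Int Int := cpus.foldl (fun d cpu =>
      let group := PySem.Int.floordiv cpu 32
      let bit := PySem.Int.mod cpu 32
      d.insert group (PySem.Int.bor (d.getD group 0) ((1 : Int) <<< bit.toNat))) PySem.Dict.empty
  match PySem.List.max? groups.keys (fun k => k) with
  | none => ""
  | some max_group =>
    let mask_parts : List String := ((PySem.List.pyRange 0 (max_group + 1) 1).reverse).foldl
        (fun acc g => acc ++ [hex8 (groups.getD g 0)]) []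
    PySem.Str.join "," mask_parts

-- ===== PORT B =====

def cpu_to_mask_alt (cpus : List Int) : String :=
  match PySem.List.max? cpus (fun x => x) with
  | none => ""
  | some m =>
    let max_group := PySem.Int.floordiv m 32
    let words : List String := (PySem.List.pyRange max_group (-1) (-1)).foldl
      (fun ws group =>
        let word := cpus.foldl (fun w cpu =>
            if PySem.Int.floordiv cpu 32 = group then
              PySem.Int.bor w ((1 : Int) <<< (PySem.Int.mod cpu 32).toNat)
            else w) 0
        ws ++ [hex8 word]) []
    PySem.Str.join "," words

-- ===== PRECONDITION & SPEC =====
-- Pre_ excludes exactly the empty list, on which both A and B raise ValueError (max() of empty sequence).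
def Pre_cpu_to_mask (cpus : List Int) : Prop := cpus ≠ []
instance (cpus : List Int) : Decidable (Pre_cpu_to_mask cpus) := by unfold Pre_cpu_to_mask; infer_instance
def pvWitness_cpu_to_mask : List Int := ([3, 32, 70])

def Spec_cpu_to_mask (cpus : List Int) (out : String) : Prop := out = cpu_to_mask_alt cpus
instance (cpus : List Int) (out : String) : Decidable (Spec_cpu_to_mask cpus out) := by unfold Spec_cpu_to_mask; infer_instance

-- ===== CLAIM =====
def Claim_equal_cpu_to_mask : Prop := ∀ (cpus : List Int), Dom_cpu_to_mask cpus → Pre_cpu_to_mask cpus → Spec_cpu_to_mask cpus (cpu_to_mask cpus)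

-- ===== LEMMAS AND PROOFS =====

def stepA (d : PySem.Dict Int Int) (cpu : Int) : PySem.Dict Int Int :=
  d.insert (PySem.Int.floordiv cpu 32)
    (PySem.Int.bor (d.getD (PySem.Int.floordiv cpu 32) 0) ((1 : Int) <<< (PySem.Int.mod cpu 32).toNat))

def wordStep (g : Int) (w : Int) (cpu : Int) : Int :=
  if PySem.Int.floordiv cpu 32 = g then
    PySem.Int.bor w ((1 : Int) <<< (PySem.Int.mod cpu 32).toNat)
  else w

lemma cpu_to_mask_def (cpus : List Int) :
    cpu_to_mask cpus =
      match PySem.List.max? (cpus.foldl stepA PySem.Dict.empty).keys (fun k => k) with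
      | none => ""
      | some max_group =>
        PySem.Str.join "," (((PySem.List.pyRange 0 (max_group + 1) 1).reverse).foldl
          (fun acc g => acc ++ [hex8 ((cpus.foldl stepA PySem.Dict.empty).getD g 0)]) []) := rfl

lemma cpu_to_mask_alt_def (cpus : List Int) :
    cpu_to_mask_alt cpus =
      match PySem.List.max? cpus (fun x => x) with
      | none => ""
      | some m =>
        PySem.Str.join ","
          ((PySem.List.pyRange (PySem.Int.floordiv m 32) (-1) (-1)).foldl
            (fun ws g => ws ++ [hex8 (cpus.foldl (wordStep g) 0)]) []) := rfl

lemma fd_mono {a b : Int} (h : a ≤ b) :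
    PySem.Int.floordiv a 32 ≤ PySem.Int.floordiv b 32 := by
  rw [PySem.Int.floordiv_eq_ediv_of_pos (by norm_num), PySem.Int.floordiv_eq_ediv_of_pos (by norm_num)]
  exact Int.ediv_le_ediv (by norm_num) h

lemma max_id_eq (xs : List Int) (m : Int) (hm : m ∈ xs) (hmax : ∀ y ∈ xs, y ≤ m) :
    PySem.List.max? xs (fun x => x) = some m := by
  cases h : PySem.List.max? xs (fun x => x) with
  | none => rw [PySem.List.max?_eq_none_iff] at h; subst h; cases hm
  | some m' =>
    have h1 : m ≤ m' := PySem.List.max?_isMax h m hm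
    have h2 : m' ≤ m := hmax m' (PySem.List.max?_mem h)
    have : m' = m := le_antisymm h2 h1
    rw [this]

lemma keys_foldA (cpus : List Int) :
    (cpus.foldl stepA PySem.Dict.empty).keys
      = PySem.Set.ofList (cpus.map (fun c => PySem.Int.floordiv c 32)) := by
  unfold stepA
  rw [PySem.Dict.keys_foldl_insert_key cpus (fun cpu => PySem.Int.floordiv cpu 32)
      (fun d cpu => PySem.Int.bor (d.getD (PySem.Int.floordiv cpu 32) 0)
        ((1 : Int) <<< (PySem.Int.mod cpu 32).toNat)) PySem.Dict.empty]
  exact PySem.Set.update_nil_left _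

-- A's dict entry for any key g equals B's direct OR-scan for group g.
lemma getD_foldA (l : List Int) (g : Int) :
    ∀ d : PySem.Dict Int Int,
      (l.foldl stepA d).getD g 0 = l.foldl (wordStep g) (d.getD g 0) := by
  induction l with
  | nil => intro d; rfl
  | cons c t ih =>
    intro d
    rw [List.foldl_cons, List.foldl_cons, ih]
    congr 1
    unfold stepA wordStep
    rw [PySem.Dict.getD_insert]
    by_cases h : PySem.Int.floordiv c 32 = g
    · rw [if_pos h.symm, if_pos h, h]
    · rw [if_neg (fun e => h e.symm), if_neg h]

lemma ports_agree (cpus : List Int) (hpre : cpus ≠ []) :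
    cpu_to_mask cpus = cpu_to_mask_alt cpus := by
  obtain ⟨M, hM⟩ : ∃ M, PySem.List.max? cpus (fun x => x) = some M := by
    cases h : PySem.List.max? cpus (fun x => x) with
    | none => exact absurd ((PySem.List.max?_eq_none_iff _ _).mp h) hpre
    | some m => exact ⟨m, rfl⟩
  have hMmem : M ∈ cpus := PySem.List.max?_mem hM
  have hMmax : ∀ y ∈ cpus, y ≤ M := fun y hy => PySem.List.max?_isMax hM y hy
  have hmaxk : PySem.List.max? (cpus.foldl stepA PySem.Dict.empty).keys (fun k => k)
      = some (PySem.Int.floordiv M 32) := by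
    apply max_id_eq
    · rw [keys_foldA, PySem.Set.mem_ofList]
      exact List.mem_map_of_mem hMmem
    · intro y hy
      rw [keys_foldA, PySem.Set.mem_ofList] at hy
      obtain ⟨c, hc, rfl⟩ := List.mem_map.mp hy
      exact fd_mono (hMmax c hc)
  rw [cpu_to_mask_def, cpu_to_mask_alt_def, hmaxk, hM]
  dsimp only
  rw [PySem.List.pyRange_neg_one_eq_reverse]
  simp only [neg_add_cancel]
  congr 1
  simp only [PySem.List.foldl_append_singleton_eq_map, List.nil_append]
  apply List.map_congr_left
  intro g _
  rw [getD_foldA cpus g PySem.Dict.empty, PySem.Dict.getD_empty]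

-- ===== VERDICT =====
theorem cpu_to_mask_spec : Claim_equal_cpu_to_mask := by
  intro cpus _ hpre
  unfold Spec_cpu_to_mask
  exact ports_agree cpus hpre
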